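-- pv_equiv track=rewrite | github.com/whiletrue-industries/rebuilding-bots | botnim/document_parser/pdfs/field_extraction.py | find_similar_field
-- ===== SOURCE A (Python) =====
-- from typing import List, Dict, Any, Optional
--
-- def find_similar_field(target_field: str, available_fields: list) -> Optional[str]:
--     """
--     Find a similar field name in the available fields.
--
--     Args:
--         target_field: The field name to find
--         available_fields: List of available field names
--
--     Returns:
--         Similar field name if found, None otherwise
--     """
--     # Direct match
--     if target_field in available_fields:
--         return target_field
--
--     # Case-insensitive match
--     target_lower = target_field.lower()
--     for field in available_fields:
--         if field.lower() == target_lower: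
--             return field
--
--     # Partial match
--     for field in available_fields:
--         if target_field in field or field in target_field:
--             return field
--
--     return None
-- ===== SOURCE B (Python) =====
-- from typing import Optional
--
-- def find_similar_field(target_field: str, available_fields: list) -> Optional[str]:
--     # Direct match
--     if target_field in available_fields:
--         return target_field
--     # One pass: return immediately on a case-insensitive match; remember the
--     # first partial match and fall back to it only if no case-insensitive hit exists.
--     target_lower = target_field.lower()
--     first_partial = None
--     for field in available_fields:
--         if field.lower() == target_lower:
--             return field
--         if first_partial is None and (target_field in field or field in target_field):
--             first_partial = field
--     return first_partial
-- ===== Notes on version B (the rewrite author's own statement) =====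
-- stated objective: simpler
-- what changed: The two separate scans (case-insensitive match then partial match) are fused into a single pass that returns a case-insensitive hit immediately and otherwise remembers the first partial match as a fallback.
import Mathlib
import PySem

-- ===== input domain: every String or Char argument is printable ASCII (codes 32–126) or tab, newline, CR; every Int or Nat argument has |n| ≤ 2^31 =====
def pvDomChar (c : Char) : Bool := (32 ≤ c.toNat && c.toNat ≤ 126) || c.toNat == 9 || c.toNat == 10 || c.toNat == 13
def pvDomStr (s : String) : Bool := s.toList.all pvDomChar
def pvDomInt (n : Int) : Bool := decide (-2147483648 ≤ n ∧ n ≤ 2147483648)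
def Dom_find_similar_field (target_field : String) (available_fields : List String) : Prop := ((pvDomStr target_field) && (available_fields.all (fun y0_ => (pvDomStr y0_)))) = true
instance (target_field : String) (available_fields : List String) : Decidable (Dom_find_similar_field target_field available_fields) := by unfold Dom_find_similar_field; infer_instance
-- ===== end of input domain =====

-- B fuses A's two fallback scans (case-insensitive, then partial) into one pass that
-- remembers the first partial match as a fallback; same results, simpler single loop.


-- ===== PORT A =====
def find_similar_field (target_field : String) (available_fields : List String) : Option String :=
  -- Direct match
  if available_fields.contains target_field then some target_field
  else
    -- Case-insensitive match: first loop, early return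
    let target_lower := PySem.Str.lower target_field
    match available_fields.find? (fun field => PySem.Str.lower field == target_lower) with
    | some field => some field
    | none =>
      -- Partial match: second loop, early return
      match available_fields.find? (fun field =>
          PySem.Str.isIn target_field field || PySem.Str.isIn field target_field) with
      | some field => some field
      | none => none

-- ===== PORT B =====
-- single pass: early return on case-insensitive hit, remember first partial match
def fsfGo (target_field target_lower : String) :
    List String → Option String → Option String
  | [], first_partial => first_partial
  | field :: rest, first_partial =>
    if PySem.Str.lower field == target_lower then some field
    else
      fsfGo target_field target_lower rest
        (if first_partial.isNone &&
            (PySem.Str.isIn target_field field || PySem.Str.isIn field target_field)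
         then some field else first_partial)

def find_similar_field_alt (target_field : String) (available_fields : List String) : Option String :=
  if available_fields.contains target_field then some target_field
  else fsfGo target_field (PySem.Str.lower target_field) available_fields none

-- ===== PRECONDITION & SPEC =====
def Spec_find_similar_field (target_field : String) (available_fields : List String) (out : Option String) : Prop := out = find_similar_field_alt target_field available_fields
instance (target_field : String) (available_fields : List String) (out : Option String) : Decidable (Spec_find_similar_field target_field available_fields out) := by unfold Spec_find_similar_field; infer_instance

-- ===== CLAIM (what is proved, stated in full; the proofs are below) =====
def Claim_equal_find_similar_field : Prop := ∀ (target_field : String) (available_fields : List String), Dom_find_similar_field target_field available_fields → Spec_find_similar_field target_field available_fields (find_similar_field target_field available_fields)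

-- ===== LEMMAS AND PROOFS =====

-- B's loop = (first case-insensitive hit) orElse (accumulator) orElse (first partial hit)
theorem fsfGo_eq (t tl : String) (l : List String) (fp : Option String) :
    fsfGo t tl l fp =
      match l.find? (fun f => PySem.Str.lower f == tl) with
      | some f => some f
      | none =>
        fp.orElse (fun _ => l.find? (fun f => PySem.Str.isIn t f || PySem.Str.isIn f t)) := by
  induction l generalizing fp with
  | nil => cases fp <;> simp [fsfGo]
  | cons f rest ih =>
    simp only [fsfGo, List.find?]
    by_cases h1 : PySem.Str.lower f == tl
    · simp [h1]
    · simp only [h1]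
      rw [ih]
      cases fp with
      | some v => simp
      | none =>
        cases h2 : (PySem.Str.isIn t f || PySem.Str.isIn f t) <;> simp [h2]

-- ===== VERDICT (by name: the statement is the Claim_ definition above) =====
theorem find_similar_field_spec : Claim_equal_find_similar_field := by
  intro t fs _
  unfold Spec_find_similar_field find_similar_field find_similar_field_alt
  by_cases h : fs.contains t = true
  · simp only [if_pos h]
  · simp only [if_neg h]
    rw [fsfGo_eq]
    cases fs.find? (fun f => PySem.Str.lower f == PySem.Str.lower t) <;>
      cases hf : fs.find? (fun f => PySem.Str.isIn t f || PySem.Str.isIn f t) <;> simp
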